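-- pv_equiv track=rewrite | github.com/hsKim25/Collision-Analysis-of-Platooning-under-Dynamic-Reconfiguration | functions.py | lane_distance
-- ===== SOURCE A (Python) =====
-- def lane_distance(base_veh, target_veh, time, lane_history):
--     prev_history = None
--     for tick in lane_history:
--         if time >= tick[0]:
--             prev_history = tick[1]
--         else:
--             break
--
--     if target_veh in prev_history:
--         return abs(prev_history.index(base_veh) - prev_history.index(target_veh))
--     else:
--         return -1
-- ===== SOURCE B (Python) =====
-- def lane_distance(base_veh, target_veh, time, lane_history):
--     lane = None
--     for tick in lane_history:
--         if time < tick[0]: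
--             break
--         lane = tick[1]
--     if base_veh == target_veh:
--         return 0 if any(v == target_veh for v in lane) else -1
--     # single state-machine pass: start counting at the first occurrence of
--     # either vehicle, return the count at the first occurrence of the other
--     other = None
--     d = 0
--     for v in lane:
--         if other is None:
--             if v == base_veh:
--                 other = target_veh
--             elif v == target_veh:
--                 other = base_veh
--         else:
--             d += 1
--             if v == other:
--                 return d
--     return -1
-- ===== Notes on version B (the rewrite author's own statement) =====
-- stated objective: alternative
-- what changed: B never computes positions at all: it runs one state-machine pass over the snapshot that starts counting at the first occurrence of either vehicle and returns the running count at the first occurrence of the other, replacing A's membership test plus two .index scans.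
import Mathlib
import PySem

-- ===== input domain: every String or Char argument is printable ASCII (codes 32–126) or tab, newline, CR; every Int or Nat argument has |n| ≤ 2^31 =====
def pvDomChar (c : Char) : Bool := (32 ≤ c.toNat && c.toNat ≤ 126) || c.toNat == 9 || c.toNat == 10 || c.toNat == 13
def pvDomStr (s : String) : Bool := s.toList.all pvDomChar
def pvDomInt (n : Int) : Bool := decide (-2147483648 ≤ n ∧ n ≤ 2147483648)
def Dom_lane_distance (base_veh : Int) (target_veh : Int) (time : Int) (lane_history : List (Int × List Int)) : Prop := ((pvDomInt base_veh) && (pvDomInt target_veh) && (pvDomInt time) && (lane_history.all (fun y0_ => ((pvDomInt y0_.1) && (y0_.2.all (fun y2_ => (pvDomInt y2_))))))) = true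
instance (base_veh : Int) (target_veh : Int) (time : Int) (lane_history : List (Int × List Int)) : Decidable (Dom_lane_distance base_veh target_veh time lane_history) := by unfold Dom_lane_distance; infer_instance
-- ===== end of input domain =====

-- B replaces A's position arithmetic (membership test + two .index scans of the snapshot)
-- by a single state-machine pass that counts the gap between the first occurrences of the
-- two vehicles (alternative decomposition, same cost class).

-- ===== PORT A =====
-- A's for-loop with break, accumulating prev_history (none = Python's None)
def aLoop (time : Int) : List (Int × List Int) → Option (List Int) → Option (List Int)
  | [], prev => prev
  | tick :: rest, prev => if time ≥ tick.1 then aLoop time rest (some tick.2) else prev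

def lane_distance (base_veh : Int) (target_veh : Int) (time : Int) (lane_history : List (Int × List Int)) : Int :=
  match aLoop time lane_history none with
  | none => 0   -- Python raises TypeError here ('in' on None); excluded by Pre_
  | some prev =>
    if target_veh ∈ prev then
      -- .index raises ValueError when absent; Pre_ guarantees base_veh is present then
      |(((PySem.List.index? prev base_veh).getD 0 : Nat) : Int) -
       (((PySem.List.index? prev target_veh).getD 0 : Nat) : Int)|
    else -1

-- ===== PORT B =====
-- B's snapshot-selection loop: lane = None; assign until time < ts, then break
def bLoop (time : Int) : List (Int × List Int) → Option (List Int) → Option (List Int)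
  | [], lane => lane
  | tick :: rest, lane => if time < tick.1 then lane else bLoop time rest (some tick.2)

-- phase 2 of B's state machine: `other` has been set, d counts; 'd += 1; if v == other: return d'
def bFind (other : Int) (d : Int) : List Int → Int
  | [] => -1
  | v :: rest => if v = other then d + 1 else bFind other (d + 1) rest

-- phase 1 of B's state machine: waiting for the first occurrence of either vehicle
def bStart (base_veh : Int) (target_veh : Int) : List Int → Int
  | [] => -1
  | v :: rest =>
    if v = base_veh then bFind target_veh 0 rest
    else if v = target_veh then bFind base_veh 0 rest
    else bStart base_veh target_veh rest

def lane_distance_alt (base_veh : Int) (target_veh : Int) (time : Int) (lane_history : List (Int × List Int)) : Int :=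
  match bLoop time lane_history none with
  | none => 0   -- Python B raises TypeError here (iterating None); excluded by Pre_
  | some lane =>
    if base_veh = target_veh then
      if lane.any (fun v => v == target_veh) then 0 else -1
    else bStart base_veh target_veh lane

-- ===== PRECONDITION & SPEC =====
-- the lane snapshot in force at `time` (last tick of the prefix with timestamp ≤ time)
def pvSnap (time : Int) (lh : List (Int × List Int)) : Option (List Int) :=
  ((lh.takeWhile (fun q => decide (q.1 ≤ time))).getLast?).map Prod.snd

-- Pre_ excludes exactly the inputs where A raises: no snapshot at or before `time`
-- (TypeError: 'in' on None), and target_veh present but base_veh absent (ValueError from .index).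
def Pre_lane_distance (base_veh : Int) (target_veh : Int) (time : Int) (lane_history : List (Int × List Int)) : Prop :=
  pvSnap time lane_history ≠ none ∧
  (target_veh ∈ (pvSnap time lane_history).getD [] → base_veh ∈ (pvSnap time lane_history).getD [])
instance (base_veh : Int) (target_veh : Int) (time : Int) (lane_history : List (Int × List Int)) : Decidable (Pre_lane_distance base_veh target_veh time lane_history) := by unfold Pre_lane_distance; infer_instance

def pvWitness_lane_distance : Int × Int × Int × (List (Int × List Int)) := (0, 1, 0, [(0, [0, 1])])

def Spec_lane_distance (base_veh : Int) (target_veh : Int) (time : Int) (lane_history : List (Int × List Int)) (out : Int) : Prop := out = lane_distance_alt base_veh target_veh time lane_history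
instance (base_veh : Int) (target_veh : Int) (time : Int) (lane_history : List (Int × List Int)) (out : Int) : Decidable (Spec_lane_distance base_veh target_veh time lane_history out) := by unfold Spec_lane_distance; infer_instance

-- ===== CLAIM (what is proved, stated in full; the proofs are below) =====
def Claim_equal_lane_distance : Prop := ∀ (base_veh : Int) (target_veh : Int) (time : Int) (lane_history : List (Int × List Int)), Dom_lane_distance base_veh target_veh time lane_history → Pre_lane_distance base_veh target_veh time lane_history → Spec_lane_distance base_veh target_veh time lane_history (lane_distance base_veh target_veh time lane_history)

-- ===== LEMMAS AND PROOFS =====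
-- the two snapshot-selection loops are the same fold (conditions are negations)
lemma aLoop_bLoop (time : Int) : ∀ (lh : List (Int × List Int)) (prev : Option (List Int)),
    aLoop time lh prev = bLoop time lh prev := by
  intro lh
  induction lh with
  | nil => intro prev; rfl
  | cons t rest ih =>
    intro prev
    by_cases h : time ≥ t.1
    · have h' : ¬ time < t.1 := by omega
      simp [aLoop, bLoop, if_pos h, if_neg h', ih]
    · have h' : time < t.1 := by omega
      simp [aLoop, bLoop, if_neg h, if_pos h']

lemma bLoop_snap (time : Int) : ∀ (lh : List (Int × List Int)) (prev : Option (List Int)),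
    bLoop time lh prev = (pvSnap time lh).or prev := by
  intro lh
  induction lh with
  | nil => intro prev; simp [bLoop, pvSnap]
  | cons t rest ih =>
    intro prev
    by_cases h : t.1 ≤ time
    · have h' : ¬ time < t.1 := by omega
      simp only [bLoop, if_neg h', pvSnap, List.takeWhile_cons, decide_eq_true_eq, if_pos h, ih]
      rw [List.getLast?_cons]
      cases hg : (rest.takeWhile (fun q => decide (q.1 ≤ time))).getLast? <;>
        simp [pvSnap, hg] at ih ⊢
    · have h' : time < t.1 := by omega
      simp [bLoop, if_pos h', pvSnap, h]

-- phase 2 in terms of index?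
lemma bFind_index (other : Int) : ∀ (l : List Int) (d : Int),
    bFind other d l = match PySem.List.index? l other with
      | some j => d + (j : Int) + 1
      | none => -1 := by
  intro l
  induction l with
  | nil => intro d; simp [bFind, PySem.List.index?]
  | cons v rest ih =>
    intro d
    by_cases h : v = other
    · subst h; rw [PySem.List.index?_cons_self]; simp [bFind]
    · rw [PySem.List.index?_cons_of_ne rest h]
      simp only [bFind, if_neg h, ih]
      cases hj : PySem.List.index? rest other with
      | none => simp
      | some j => simp; omega

lemma bStart_absent (base_veh target_veh : Int) : ∀ (l : List Int),
    target_veh ∉ l → bStart base_veh target_veh l = -1 := by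
  intro l
  induction l with
  | nil => intro _; rfl
  | cons v rest ih =>
    intro h
    have hvt : v ≠ target_veh := fun he => h (he ▸ List.mem_cons_self)
    have hr : target_veh ∉ rest := fun hm => h (List.mem_cons_of_mem _ hm)
    by_cases hb : v = base_veh
    · simp only [bStart, if_pos hb]
      rw [bFind_index, (PySem.List.index?_eq_none_iff rest target_veh).mpr hr]
    · simp only [bStart, if_neg hb, if_neg hvt, ih hr]

lemma bStart_both (base_veh target_veh : Int) (hne : base_veh ≠ target_veh) :
    ∀ (l : List Int), base_veh ∈ l → target_veh ∈ l →
    bStart base_veh target_veh l =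
      |(((PySem.List.index? l base_veh).getD 0 : Nat) : Int) -
       (((PySem.List.index? l target_veh).getD 0 : Nat) : Int)| := by
  intro l
  induction l with
  | nil => intro h; cases h
  | cons v rest ih =>
    intro hb ht
    by_cases hvb : v = base_veh
    · have hvt : v ≠ target_veh := hvb ▸ hne
      have htr : target_veh ∈ rest := by
        cases ht with
        | head => exact absurd rfl hvt
        | tail _ h => exact h
      obtain ⟨j, hj⟩ := Option.isSome_iff_exists.mp
        ((PySem.List.index?_isSome_iff rest target_veh).mpr htr)
      rw [show bStart base_veh target_veh (v :: rest)
            = bFind target_veh 0 rest from by simp [bStart, if_pos hvb],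
        bFind_index, hj, ← hvb, PySem.List.index?_cons_self,
        PySem.List.index?_cons_of_ne rest hvt, hj]
      simp only [Option.map_some, Option.getD_some]
      rw [Nat.cast_zero, zero_sub, abs_neg, Nat.abs_cast]
      push_cast
      ring
    · by_cases hvt : v = target_veh
      · have hbr : base_veh ∈ rest := by
          cases hb with
          | head => exact absurd rfl (Ne.symm hvb)
          | tail _ h => exact h
        obtain ⟨j, hj⟩ := Option.isSome_iff_exists.mp
          ((PySem.List.index?_isSome_iff rest base_veh).mpr hbr)
        rw [show bStart base_veh target_veh (v :: rest)
              = bFind base_veh 0 rest from by simp [bStart, if_neg hvb, if_pos hvt],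
          bFind_index, hj, ← hvt, PySem.List.index?_cons_self,
          PySem.List.index?_cons_of_ne rest hvb, hj]
        simp only [Option.map_some, Option.getD_some]
        rw [Nat.cast_zero, sub_zero, Nat.abs_cast]
        push_cast
        ring
      · have hbr : base_veh ∈ rest := by
          cases hb with
          | head => exact absurd rfl (Ne.symm hvb)
          | tail _ h => exact h
        have htr : target_veh ∈ rest := by
          cases ht with
          | head => exact absurd rfl (Ne.symm hvt)
          | tail _ h => exact h
        obtain ⟨jb, hjb⟩ := Option.isSome_iff_exists.mp
          ((PySem.List.index?_isSome_iff rest base_veh).mpr hbr)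
        obtain ⟨jt, hjt⟩ := Option.isSome_iff_exists.mp
          ((PySem.List.index?_isSome_iff rest target_veh).mpr htr)
        rw [show bStart base_veh target_veh (v :: rest)
              = bStart base_veh target_veh rest from by simp [bStart, if_neg hvb, if_neg hvt],
          ih hbr htr, PySem.List.index?_cons_of_ne rest hvb,
          PySem.List.index?_cons_of_ne rest hvt, hjb, hjt]
        simp only [Option.map_some, Option.getD_some]
        congr 1
        push_cast; ring

-- ===== VERDICT (by name: the statement is the Claim_ definition above) =====
theorem lane_distance_spec : Claim_equal_lane_distance := by
  intro base_veh target_veh time lane_history _ hpre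
  obtain ⟨hne, himp⟩ := hpre
  unfold Spec_lane_distance lane_distance lane_distance_alt
  rw [aLoop_bLoop, bLoop_snap, Option.or_none]
  cases hs : pvSnap time lane_history with
  | none => exact absurd hs hne
  | some lane =>
    rw [hs] at himp
    simp only [Option.getD_some] at himp
    simp only []
    by_cases ht : target_veh ∈ lane
    · rw [if_pos ht]
      by_cases heq : base_veh = target_veh
      · subst heq
        have : lane.any (fun v => v == base_veh) = true := by
          simp only [List.any_eq_true, beq_iff_eq]
          exact ⟨base_veh, ht, rfl⟩
        rw [if_pos rfl, if_pos this]
        simp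
      · rw [if_neg heq, bStart_both base_veh target_veh heq lane (himp ht) ht]
    · rw [if_neg ht]
      by_cases heq : base_veh = target_veh
      · subst heq
        have : lane.any (fun v => v == base_veh) = false := by
          simp only [List.any_eq_false, beq_iff_eq]
          intro x hx he; exact ht (he ▸ hx)
        rw [if_pos rfl, if_neg (by simp [this])]
      · rw [if_neg heq, bStart_absent base_veh target_veh lane ht]
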